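-- pv_equiv track=rewrite | github.com/crixodia/aoc | 2015/19_medicine_for_rudolph/main.py | solve
-- ===== SOURCE A (Python) =====
-- def solve(p_input):
--     rules, molecule = p_input
--     keys = rules.keys()
--     new_molecules = set()
--
--     for k in keys:
--         idx = molecule.find(k)
--         while idx != -1:
--             part_a = molecule[:idx]
--             part_b = molecule[idx + len(k) :]
--             values = rules[k]
--
--             for val in values:
--                 new_mol = part_a + val + part_b
--                 new_molecules.add(new_mol)
--
--             idx = molecule.find(k, idx + 1)
--
--     return new_molecules
-- ===== SOURCE B (Python) =====
-- def solve(p_input):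
--     # Rabin-Karp: per key, find occurrences with an exact rolling polynomial
--     # hash (big-int, base > any code point, so no collisions) instead of str.find.
--     rules, molecule = p_input
--     BASE = 1114112
--     n = len(molecule)
--     out = set()
--     for k, vals in rules.items():
--         L = len(k)
--         if L > n:
--             continue
--         pw = BASE ** L
--         hk = 0
--         for c in k:
--             hk = hk * BASE + ord(c)
--         h = 0
--         for c in molecule[:L]:
--             h = h * BASE + ord(c)
--         for i in range(n - L + 1):
--             if i > 0:
--                 h = h * BASE + ord(molecule[i + L - 1]) - ord(molecule[i - 1]) * pw
--             if h == hk: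
--                 for val in vals:
--                     out.add(molecule[:i] + val + molecule[i + L:])
--     return out
-- ===== Notes on version B (the rewrite author's own statement) =====
-- stated objective: alternative
-- what changed: A locates each key's occurrences by repeated str.find jumps; B uses Rabin-Karp: per key it computes an exact big-integer rolling polynomial hash (base 1114112, larger than any code point, so equal hash means equal window and no verification pass is needed) over a single sweep of window positions, substituting the values where the window hash equals the key hash.
import Mathlib
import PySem

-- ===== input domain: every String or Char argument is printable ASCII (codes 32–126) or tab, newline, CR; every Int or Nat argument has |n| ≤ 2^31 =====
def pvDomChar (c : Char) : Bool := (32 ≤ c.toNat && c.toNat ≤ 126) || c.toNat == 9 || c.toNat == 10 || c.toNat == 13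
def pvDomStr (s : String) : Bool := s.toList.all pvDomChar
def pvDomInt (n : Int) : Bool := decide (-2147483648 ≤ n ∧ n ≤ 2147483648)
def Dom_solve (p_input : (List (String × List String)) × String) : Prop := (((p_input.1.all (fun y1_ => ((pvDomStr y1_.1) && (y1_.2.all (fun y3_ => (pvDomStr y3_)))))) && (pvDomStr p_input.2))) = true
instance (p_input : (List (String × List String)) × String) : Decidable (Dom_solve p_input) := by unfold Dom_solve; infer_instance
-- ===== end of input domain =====

-- B finds each key's occurrences with Rabin–Karp: an exact big-integer rolling polynomial
-- hash (base 1114112 > every code point, so equal hash = equal window, no verification pass)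
-- replaces A's str.find jumping scan; same return value (objective: alternative).

-- ===== PORT A =====
-- A's inner 'while idx != -1' loop; fuel is an upper bound on the iteration count
-- (each step strictly increases idx, so m.length + 2 steps always suffice — proved below).
def solveWhile (m k : List Char) (vals : List String) : Nat → Int → PySem.Set (List Char) → PySem.Set (List Char)
  | 0, _, s => s
  | fuel + 1, idx, s =>
    if idx = -1 then s
    else
      let part_a := PySem.List.slice m none (some idx)
      let part_b := PySem.List.slice m (some (idx + (k.length : Int))) none
      let s' := vals.foldl (fun s val => PySem.Set.add s (part_a ++ val.toList ++ part_b)) s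
      solveWhile m k vals fuel (PySem.Chars.findFrom m k (idx + 1)) s'

def solve (p_input : (List (String × List String)) × String) : List String :=
  let rules := PySem.Dict.ofList p_input.1
  let m := p_input.2.toList
  let new_molecules :=
    rules.keys.foldl
      (fun s k =>
        solveWhile m k.toList (rules.getD k []) (m.length + 2) (PySem.Chars.find m k.toList) s)
      PySem.Set.empty
  new_molecules.map String.ofList

-- ===== PORT B =====
-- body of Source B's 'for i in range(n - L + 1)' loop: state = (rolling hash h, result set)
def rkBody (m kl : List Char) (vals : List String) (hk pw : Int)
    (st : Int × PySem.Set (List Char)) (i : Int) : Int × PySem.Set (List Char) :=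
  let h := if 0 < i then
      st.1 * 1114112 + ((PySem.List.pyGetD m (i + (kl.length : Int) - 1) 'a').toNat : Int)
        - ((PySem.List.pyGetD m (i - 1) 'a').toNat : Int) * pw
    else st.1
  (h, if h = hk then
        vals.foldl (fun s val =>
          PySem.Set.add s (PySem.List.slice m none (some i) ++ val.toList ++
            PySem.List.slice m (some (i + (kl.length : Int))) none)) st.2
      else st.2)

def solve_alt (p_input : (List (String × List String)) × String) : List String :=
  let rules := PySem.Dict.ofList p_input.1
  let m := p_input.2.toList
  let n := m.length
  let out :=
    rules.items.foldl
      (fun s kv =>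
        let kl := kv.1.toList
        let L := kl.length
        if n < L then s                                   -- 'if L > n: continue'
        else
          let pw : Int := (1114112 : Int) ^ L
          let hk := kl.foldl (fun h c => h * 1114112 + (c.toNat : Int)) 0
          let h0 := (PySem.List.slice m none (some (L : Int))).foldl
            (fun h c => h * 1114112 + (c.toNat : Int)) 0
          ((PySem.List.pyRange 0 ((n : Int) - (L : Int) + 1)).foldl
              (rkBody m kl kv.2 hk pw) (h0, s)).2)
      PySem.Set.empty
  out.map String.ofList

-- ===== PRECONDITION & SPEC =====
def Spec_solve (p_input : (List (String × List String)) × String) (out : List String) : Prop := out = solve_alt p_input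
instance (p_input : (List (String × List String)) × String) (out : List String) : Decidable (Spec_solve p_input out) := by unfold Spec_solve; infer_instance

-- ===== CLAIM (what is proved, stated in full; the proofs are below) =====
def Claim_equal_solve : Prop := ∀ (p_input : (List (String × List String)) × String), Dom_solve p_input → Spec_solve p_input (solve p_input)

-- ===== LEMMAS AND PROOFS =====

-- the per-occurrence step (add every replacement at position i), shared shape of both loops
def stepAdd (m kl : List Char) (vals : List String) (s : PySem.Set (List Char)) (i : Int) : PySem.Set (List Char) :=
  vals.foldl
    (fun s val =>
      PySem.Set.add s
        (PySem.List.slice m none (some i) ++ val.toList ++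
          PySem.List.slice m (some (i + (kl.length : Int))) none))
    s

theorem findFrom_past_end (m k : List Char) (j : Nat) (h : m.length < j) :
    PySem.Chars.findFrom m k (j : Int) = -1 := by
  unfold PySem.Chars.findFrom
  have h1 : ¬ ((j:Int) < 0) := by omega
  simp only [if_neg h1]
  have h2 : (m.length : Int) < (j : Int) := by exact_mod_cast h
  simp only [if_pos h2]

-- A's find/while loop visits exactly the ascending occurrence positions ≥ start
theorem solveWhile_eq (m kl : List Char) (vals : List String) (start : Nat)
    (hstart : start ≤ m.length + 1) (fuel : Nat) (hf : m.length + 2 - start ≤ fuel)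
    (s : PySem.Set (List Char)) :
    solveWhile m kl vals fuel (PySem.Chars.findFrom m kl (start : Int)) s
      = (((List.range' start (m.length + 1 - start)).filter
            (fun i => decide (kl <+: m.drop i))).map (fun i : Nat => (i : Int))).foldl
          (stepAdd m kl vals) s := by
  induction fuel generalizing start s with
  | zero => omega
  | succ fuel ih =>
    by_cases hj : PySem.Chars.findFrom m kl (start : Int) = -1
    · -- no further occurrence: loop stops, filtered list is empty
      rw [hj]
      have hemp : (List.range' start (m.length + 1 - start)).filter
          (fun i => decide (kl <+: m.drop i)) = [] := by
        rw [List.filter_eq_nil_iff]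
        intro i hi
        simp only [List.mem_range'_1] at hi
        rcases Nat.lt_or_ge start (m.length + 1) with hlt | hge
        · have hstart' : start ≤ m.length := by omega
          rw [PySem.Chars.findFrom_natCast_eq_neg_one_iff m kl start hstart'] at hj
          simp only [decide_eq_true_eq]
          intro hpre
          refine hj ?_
          have hdd : m.drop i = List.drop (i - start) (m.drop start) := by
            rw [List.drop_drop]; congr 1; omega
          rw [hdd] at hpre
          exact hpre.isInfix.trans (List.drop_suffix _ _).isInfix
        · omega
      rw [hemp]
      simp [solveWhile]
    · -- an occurrence j ≥ start exists
      have hstart' : start ≤ m.length := by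
        by_contra h
        exact hj (findFrom_past_end m kl start (by omega))
      obtain ⟨hge, hpre, hmin⟩ := PySem.Chars.findFrom_natCast_spec m kl start hstart' hj
      set j : Int := PySem.Chars.findFrom m kl (start : Int) with hjdef
      have hj0 : 0 ≤ j := le_trans (by exact_mod_cast Nat.zero_le start) hge
      have hjle : j ≤ m.length := by
        rw [PySem.Chars.findFrom_natCast m kl start hstart'] at hjdef
        split at hjdef
        · exact absurd hjdef hj
        · have := PySem.Chars.find_le_length (m.drop start) kl
          rw [hjdef]
          simp [List.length_drop] at this ⊢
          omega
      set jn : Nat := j.toNat with hjn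
      have hjcast : j = (jn : Int) := by omega
      have hjnle : jn ≤ m.length := by omega
      have hjnge : start ≤ jn := by omega
      -- unfold one loop iteration
      rw [show solveWhile m kl vals (fuel+1) j s
            = solveWhile m kl vals fuel (PySem.Chars.findFrom m kl (j + 1)) (stepAdd m kl vals s j) from by
          simp [solveWhile, if_neg hj, stepAdd]]
      have hj1 : j + 1 = ((jn + 1 : Nat) : Int) := by omega
      rw [hj1, ih (jn+1) (by omega) (by omega)]
      -- split the filtered range at jn
      have hsplit : List.range' start (m.length + 1 - start)
          = List.range' start (jn - start) ++ jn :: List.range' (jn + 1) (m.length + 1 - (jn + 1)) := by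
        have h2 : (jn :: List.range' (jn + 1) (m.length + 1 - (jn + 1)) : List Nat)
            = List.range' jn (m.length + 1 - jn) := by
          rw [show m.length + 1 - jn = (m.length + 1 - (jn + 1)) + 1 by omega, List.range'_succ]
        rw [h2]
        have h3 := @List.range'_append start (jn - start) (m.length + 1 - jn) 1
        rw [show start + 1 * (jn - start) = jn by omega] at h3
        rw [h3, show jn - start + (m.length + 1 - jn) = m.length + 1 - start by omega]
      have hfilt1 : (List.range' start (jn - start)).filter (fun i => decide (kl <+: m.drop i)) = [] := by
        rw [List.filter_eq_nil_iff]
        intro i hi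
        simp only [List.mem_range'_1] at hi
        simp only [decide_eq_true_eq]
        exact hmin i hi.1 (by omega)
      have hfiltj : decide (kl <+: m.drop jn) = true := by simpa using hpre
      rw [hsplit, List.filter_append, hfilt1, List.nil_append]
      simp only [List.filter_cons, hfiltj, if_true, List.map_cons, List.foldl_cons]
      rw [hjcast]

-- ---- B-side: the exact polynomial hash and its properties ----

def hashOf (cs : List Char) : Int := cs.foldl (fun h c => h * 1114112 + (c.toNat : Int)) 0

theorem char_toNat_lt (c : Char) : c.toNat < 1114112 := by
  have h : c.val.toNat.isValidChar := c.valid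
  rw [Char.toNat_val] at h
  rcases h with h | ⟨h1, h2⟩ <;> omega

theorem char_eq_of_toNat_eq (a b : Char) (h : a.toNat = b.toNat) : a = b := by
  apply Char.ext
  apply UInt32.toNat_inj.mp
  simpa [Char.toNat_val] using h

theorem hashOf_cons (c : Char) (cs : List Char) :
    hashOf (c :: cs) = (c.toNat : Int) * 1114112 ^ cs.length + hashOf cs := by
  induction cs using List.reverseRecOn with
  | nil => simp [hashOf]
  | append_singleton ds d ih =>
    have h1 : hashOf ((c :: ds) ++ [d]) = hashOf (c :: ds) * 1114112 + (d.toNat : Int) := by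
      simp [hashOf, List.foldl_append]
    have h2 : hashOf (ds ++ [d]) = hashOf ds * 1114112 + (d.toNat : Int) := by
      simp [hashOf, List.foldl_append]
    simp only [List.cons_append] at h1
    rw [h1, ih, h2, List.length_append, List.length_singleton]
    ring



theorem hashOf_append_singleton (cs : List Char) (c : Char) :
    hashOf (cs ++ [c]) = hashOf cs * 1114112 + (c.toNat : Int) := by
  simp [hashOf, List.foldl_append]

theorem hashOf_nonneg (cs : List Char) : 0 ≤ hashOf cs := by
  induction cs with
  | nil => simp [hashOf]
  | cons c cs ih =>
    rw [hashOf_cons]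
    have hp : (0:Int) < 1114112 ^ cs.length := by positivity
    have : (0:Int) ≤ (c.toNat : Int) := by positivity
    nlinarith

theorem hashOf_lt (cs : List Char) : hashOf cs < 1114112 ^ cs.length := by
  induction cs with
  | nil => simp [hashOf]
  | cons c cs ih =>
    rw [hashOf_cons, List.length_cons, pow_succ]
    have hp : (0:Int) < 1114112 ^ cs.length := by positivity
    have hc : ((c.toNat : Int) + 1) ≤ 1114112 := by
      have := char_toNat_lt c; exact_mod_cast this
    have h1 : (c.toNat : Int) * 1114112 ^ cs.length + hashOf cs
        < ((c.toNat : Int) + 1) * 1114112 ^ cs.length := by nlinarith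
    have h2 : ((c.toNat : Int) + 1) * 1114112 ^ cs.length ≤ 1114112 ^ cs.length * 1114112 := by
      nlinarith
    linarith

theorem hashOf_inj (cs ds : List Char) (hl : cs.length = ds.length)
    (h : hashOf cs = hashOf ds) : cs = ds := by
  induction cs generalizing ds with
  | nil => cases ds with
    | nil => rfl
    | cons d ds => simp at hl
  | cons c cs ih =>
    cases ds with
    | nil => simp at hl
    | cons d ds =>
      simp only [List.length_cons, Nat.add_right_cancel_iff] at hl
      rw [hashOf_cons, hashOf_cons, hl] at h
      set P : Int := 1114112 ^ ds.length with hP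
      have hp : (0:Int) < P := by positivity
      have b1 := hashOf_nonneg cs
      have b2 := hashOf_nonneg ds
      have b3 := hashOf_lt cs
      have b4 := hashOf_lt ds
      rw [hl] at b3
      rw [← hP] at b3 b4
      have hcd : (c.toNat : Int) = (d.toNat : Int) := by
        rcases lt_trichotomy ((c.toNat : Int)) ((d.toNat : Int)) with hlt | heq | hgt
        · have h1 : (c.toNat : Int) + 1 ≤ (d.toNat : Int) := by omega
          nlinarith
        · exact heq
        · have h1 : (d.toNat : Int) + 1 ≤ (c.toNat : Int) := by omega
          nlinarith
      have hch : c = d := char_eq_of_toNat_eq c d (by exact_mod_cast hcd)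
      have hrest : hashOf cs = hashOf ds := by
        rw [hcd] at h; linarith
      rw [hch, ih ds hl hrest]

-- the match condition of B at position i is exactly A's prefix condition
theorem cond_iff (m kl : List Char) (i : Nat) (hi : i + kl.length ≤ m.length) :
    (hashOf (List.take kl.length (List.drop i m)) = hashOf kl) ↔ kl <+: m.drop i := by
  have hlen : (List.take kl.length (List.drop i m)).length = kl.length := by
    simp [List.length_take, List.length_drop]; omega
  constructor
  · intro h
    have := hashOf_inj _ _ hlen h
    rw [List.prefix_iff_eq_take, this]
  · intro h
    rw [List.prefix_iff_eq_take] at h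
    rw [← h]

-- the rolling-hash update is correct
theorem roll (m kl : List Char) (j : Nat) (hj : j + kl.length < m.length) :
    hashOf (List.take kl.length (List.drop (j+1) m))
      = hashOf (List.take kl.length (List.drop j m)) * 1114112
        + ((m.getD (j + kl.length) 'a').toNat : Int)
        - ((m.getD j 'a').toNat : Int) * 1114112 ^ kl.length := by
  cases hL : kl.length with
  | zero => simp [hashOf]
  | succ Lp =>
    have hjm : j < m.length := by omega
    have hjLm : j + 1 + Lp < m.length + 1 := by omega
    have h1 : List.take (Lp + 1) (List.drop j m)
        = m[j]'hjm :: List.take Lp (List.drop (j+1) m) := by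
      rw [List.drop_eq_getElem_cons hjm, List.take_succ_cons]
    have hidx : j + 1 + Lp < m.length := by omega
    have h2 : List.take (Lp + 1) (List.drop (j+1) m)
        = List.take Lp (List.drop (j+1) m) ++ [m[j + 1 + Lp]'hidx] := by
      rw [List.take_add_one]
      congr 1
      rw [List.getElem?_drop]
      rw [List.getElem?_eq_getElem (by omega : j + 1 + Lp < m.length)]
      simp
    have hlenT : (List.take Lp (List.drop (j+1) m)).length = Lp := by
      simp [List.length_take, List.length_drop]; omega
    rw [h1, h2, hashOf_cons, hashOf_append_singleton, hlenT]
    have hg1 : m.getD (j + (Lp + 1)) 'a' = m[j + 1 + Lp]'hidx := by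
      rw [List.getD_eq_getElem m 'a' (by omega : j + (Lp + 1) < m.length)]
      congr 1; omega
    have hg2 : m.getD j 'a' = m[j]'hjm := by
      rw [List.getD_eq_getElem m 'a' hjm]
    rw [hg1, hg2]
    ring

-- B's scan loop from position start adds exactly the replacements at matching positions
theorem rkLoop (m kl : List Char) (vals : List String) (hL : kl.length ≤ m.length) :
    ∀ (cnt start : Nat) (s : PySem.Set (List Char)), 1 ≤ start →
      start + cnt = m.length - kl.length + 1 →
    (List.foldl (fun st (i : Nat) => rkBody m kl vals (hashOf kl) ((1114112:Int) ^ kl.length) st (i : Int))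
        (hashOf (List.take kl.length (List.drop (start - 1) m)), s) (List.range' start cnt)).2
      = List.foldl (stepAdd m kl vals) s
          (((List.range' start cnt).filter (fun i => decide (kl <+: m.drop i))).map (fun i : Nat => (i : Int))) := by
  intro cnt
  induction cnt with
  | zero => intro start s _ _; simp
  | succ cnt ih =>
    intro start s hstart hcnt
    have hstartle : start ≤ m.length - kl.length := by omega
    have hstartL : start + kl.length ≤ m.length := by omega
    rw [List.range'_succ, List.foldl_cons]
    have hpos : (0:Int) < ((start : Nat) : Int) := by exact_mod_cast hstart
    have hs1 : start - 1 + 1 = start := by omega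
    have hroll := roll m kl (start - 1) (by omega)
    rw [hs1] at hroll
    have hstep : rkBody m kl vals (hashOf kl) ((1114112:Int) ^ kl.length)
        (hashOf (List.take kl.length (List.drop (start - 1) m)), s) ((start : Nat) : Int)
        = (hashOf (List.take kl.length (List.drop start m)),
           if hashOf (List.take kl.length (List.drop start m)) = hashOf kl
           then stepAdd m kl vals s ((start : Nat) : Int) else s) := by
      simp only [rkBody, if_pos hpos]
      have hc1 : ((start : Nat) : Int) + (kl.length : Int) - 1 = ((start - 1 + kl.length : Nat) : Int) := by
        push_cast; omega
      have hc2 : ((start : Nat) : Int) - 1 = ((start - 1 : Nat) : Int) := by omega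
      rw [hc1, hc2, PySem.List.pyGetD_natCast, PySem.List.pyGetD_natCast]
      rw [List.getD_eq_getElem m 'a' (by omega : start - 1 + kl.length < m.length),
          List.getD_eq_getElem m 'a' (by omega : start - 1 < m.length)] at hroll ⊢
      rw [← hroll]
      rfl
    rw [hstep]
    have hih := ih (start + 1) (if hashOf (List.take kl.length (List.drop start m)) = hashOf kl
        then stepAdd m kl vals s ((start : Nat) : Int) else s) (by omega) (by omega)
    rw [Nat.add_sub_cancel] at hih
    rw [hih]
    rw [List.filter_cons]
    by_cases hm : kl <+: m.drop start
    · have hcond : hashOf (List.take kl.length (List.drop start m)) = hashOf kl :=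
        (cond_iff m kl start hstartL).mpr hm
      rw [if_pos hcond, if_pos (by simpa using hm)]
      simp only [List.map_cons, List.foldl_cons]
    · have hcond : ¬ hashOf (List.take kl.length (List.drop start m)) = hashOf kl :=
        fun h => hm ((cond_iff m kl start hstartL).mp h)
      rw [if_neg hcond, if_neg (by simpa using hm)]


-- one key of B's outer loop equals A's per-key contribution
theorem rkKey (m kl : List Char) (vals : List String) (s : PySem.Set (List Char)) :
    (if m.length < kl.length then s
     else ((PySem.List.pyRange 0 ((m.length : Int) - (kl.length : Int) + 1)).foldl
         (rkBody m kl vals (hashOf kl) ((1114112:Int) ^ kl.length))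
         (hashOf (List.take kl.length m), s)).2)
      = (((List.range (m.length + 1)).filter
            (fun i => decide (kl <+: m.drop i))).map (fun i : Nat => (i : Int))).foldl
          (stepAdd m kl vals) s := by
  by_cases hL : m.length < kl.length
  · rw [if_pos hL]
    have hnil : (List.range (m.length + 1)).filter (fun i => decide (kl <+: m.drop i)) = [] := by
      rw [List.filter_eq_nil_iff]
      intro i hi
      simp only [decide_eq_true_eq]
      intro hpre
      have h1 := hpre.length_le
      simp only [List.length_drop] at h1
      omega
    rw [hnil]
    rfl
  · rw [if_neg hL]
    have hLe : kl.length ≤ m.length := by omega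
    have hcast : ((m.length : Int) - (kl.length : Int) + 1)
        = ((m.length - kl.length + 1 : Nat) : Int) := by push_cast; omega
    rw [hcast, PySem.List.pyRange_zero_natCast, List.foldl_map]
    rw [List.range_eq_range', List.range'_succ, List.foldl_cons]
    have hstep0 : rkBody m kl vals (hashOf kl) ((1114112:Int) ^ kl.length)
        (hashOf (List.take kl.length m), s) ((0 : Nat) : Int)
        = (hashOf (List.take kl.length m),
           if hashOf (List.take kl.length m) = hashOf kl
           then stepAdd m kl vals s ((0 : Nat) : Int) else s) := by
      simp [rkBody, stepAdd]
    rw [hstep0]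
    have hloop := rkLoop m kl vals hLe (m.length - kl.length) 1
      (if hashOf (List.take kl.length m) = hashOf kl
       then stepAdd m kl vals s ((0 : Nat) : Int) else s) (le_refl 1) (by omega)
    simp only [Nat.sub_self, List.drop_zero] at hloop
    rw [hloop]
    have hsplit : List.range (m.length + 1)
        = (0 :: List.range' 1 (m.length - kl.length)) ++ List.range' (m.length - kl.length + 1) kl.length := by
      rw [List.range_eq_range']
      have h1 : (0 :: List.range' 1 (m.length - kl.length) : List Nat)
          = List.range' 0 (m.length - kl.length + 1) := by
        rw [List.range'_succ]
      rw [h1]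
      have h3 := @List.range'_append 0 (m.length - kl.length + 1) kl.length 1
      rw [show 0 + 1 * (m.length - kl.length + 1) = m.length - kl.length + 1 by omega] at h3
      rw [h3, show m.length - kl.length + 1 + kl.length = m.length + 1 by omega]
    rw [hsplit, List.filter_append]
    have hnil2 : (List.range' (m.length - kl.length + 1) kl.length).filter
        (fun i => decide (kl <+: m.drop i)) = [] := by
      rw [List.filter_eq_nil_iff]
      intro i hi
      simp only [List.mem_range'_1] at hi
      simp only [decide_eq_true_eq]
      intro hpre
      have h1 := hpre.length_le
      simp only [List.length_drop] at h1
      omega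
    rw [hnil2, List.append_nil, List.filter_cons]
    by_cases hm : kl <+: List.drop 0 m
    · have hh : hashOf (List.take kl.length m) = hashOf kl := by
        have h1 := (cond_iff m kl 0 (by omega)).mpr hm
        simpa using h1
      rw [if_pos hh, if_pos (by simpa using hm)]
      simp only [List.map_cons, List.foldl_cons]
    · have hh : ¬ hashOf (List.take kl.length m) = hashOf kl := by
        intro h
        exact hm ((cond_iff m kl 0 (by omega)).mp (by simpa using h))
      rw [if_neg hh, if_neg (by simpa using hm)]


-- ===== VERDICT (by name: the statement is the Claim_ definition above) =====
theorem solve_spec : Claim_equal_solve := by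
  unfold Claim_equal_solve
  intro p _
  unfold Spec_solve
  simp only [solve, solve_alt]
  congr 1
  rw [PySem.Dict.items_eq_map_keys (PySem.Dict.ofList p.1)
    (PySem.Dict.nodup_keys_ofList p.1) ([] : List String), List.foldl_map]
  apply PySem.List.foldl_congr_mem
  intro s k hk
  have hA := solveWhile_eq p.2.toList k.toList ((PySem.Dict.ofList p.1).getD k []) 0
    (by omega) (p.2.toList.length + 2) (by omega) s
  rw [Nat.cast_zero, PySem.Chars.findFrom_zero, Nat.sub_zero, ← List.range_eq_range'] at hA
  rw [hA, ← rkKey p.2.toList k.toList ((PySem.Dict.ofList p.1).getD k []) s]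
  simp only [PySem.List.slice_to_natCast]
  rfl
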